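-- pv_equiv track=rewrite | github.com/mobarski/morty | src/asm.py | detect_labels
-- ===== SOURCE A (Python) =====
-- def detect_labels(tokens):
-- 	pos = 0
-- 	pos_by_label = {}
-- 	for i,t in enumerate(tokens):
-- 		if t[-1]==':':
-- 			label = t[:-1]
-- 			pos_by_label[label] = pos
-- 		else:
-- 			pos += 1
-- 	return pos_by_label
-- ===== SOURCE B (Python) =====
-- def detect_labels(tokens):
--     # two passes: first a prefix table of non-label counts, then map labels through it
--     n = len(tokens)
--     prefix = [0] * (n + 1)
--     for i, t in enumerate(tokens):
--         prefix[i + 1] = prefix[i] + (0 if t[-1] == ':' else 1)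
--     return {t[:-1]: prefix[i] for i, t in enumerate(tokens) if t[-1] == ':'}
-- ===== Notes on version B (the rewrite author's own statement) =====
-- stated objective: alternative
-- what changed: Replaces the single pass with an inline position accumulator by two differently-shaped passes: one builds a prefix table of non-label counts, the other maps each label to its precomputed table entry via a dict comprehension.
import Mathlib
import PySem

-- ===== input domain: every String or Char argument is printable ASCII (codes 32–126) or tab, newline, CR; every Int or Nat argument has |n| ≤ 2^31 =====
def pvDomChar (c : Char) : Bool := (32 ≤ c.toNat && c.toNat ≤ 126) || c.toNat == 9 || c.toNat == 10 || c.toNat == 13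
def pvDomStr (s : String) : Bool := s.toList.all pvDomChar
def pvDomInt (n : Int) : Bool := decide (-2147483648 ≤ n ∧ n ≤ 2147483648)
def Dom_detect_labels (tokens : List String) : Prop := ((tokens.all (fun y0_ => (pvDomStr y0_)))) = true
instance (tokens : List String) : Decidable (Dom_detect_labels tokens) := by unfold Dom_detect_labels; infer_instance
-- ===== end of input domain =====

-- B replaces A's inline position accumulator by a precomputed prefix table of non-label counts (alternative decomposition, same cost).

-- ===== PORT A =====
-- one pass; the running position and the dict are the fold state (Python's enumerate index i is unused)
def detect_labels (tokens : List String) : List (String × Int) :=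
  (tokens.foldl
    (fun (st : Int × PySem.Dict String Int) t =>
      if PySem.Str.pyGet? t (-1) = some ':' then
        (st.1, st.2.insert (PySem.Str.slice t none (some (-1))) st.1)
      else (st.1 + 1, st.2))
    (0, PySem.Dict.empty)).2.items

-- ===== PORT B =====
-- pvPrefix tokens acc = the prefix table: entry i is acc + (# non-label tokens among the first i)
def pvPrefix : List String → Int → List Int
  | [], _ => []
  | t :: ts, acc =>
      acc :: pvPrefix ts (acc + (if PySem.Str.pyGet? t (-1) = some ':' then 0 else 1))

-- second pass: dict comprehension over tokens paired with their prefix-table entries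
def detect_labels_alt (tokens : List String) : List (String × Int) :=
  ((tokens.zip (pvPrefix tokens 0)).foldl
    (fun (d : PySem.Dict String Int) tp =>
      if PySem.Str.pyGet? tp.1 (-1) = some ':' then
        d.insert (PySem.Str.slice tp.1 none (some (-1))) tp.2
      else d)
    PySem.Dict.empty).items

-- ===== PRECONDITION & SPEC =====
-- Pre_ excludes lists containing an empty-string token, on which Python A raises IndexError at t[-1].
def Pre_detect_labels (tokens : List String) : Prop := ∀ t ∈ tokens, t ≠ ""
instance (tokens : List String) : Decidable (Pre_detect_labels tokens) := by
  unfold Pre_detect_labels; infer_instance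
def pvWitness_detect_labels : List String := ["loop:", "add", "jmp", "end:"]

def Spec_detect_labels (tokens : List String) (out : List (String × Int)) : Prop := out = detect_labels_alt tokens
instance (tokens : List String) (out : List (String × Int)) : Decidable (Spec_detect_labels tokens out) := by unfold Spec_detect_labels; infer_instance

-- ===== CLAIM (what is proved, stated in full; the proofs are below) =====
def Claim_equal_detect_labels : Prop := ∀ (tokens : List String), Dom_detect_labels tokens → Pre_detect_labels tokens → Spec_detect_labels tokens (detect_labels tokens)

-- ===== LEMMAS AND PROOFS =====

-- loop correspondence: A's fold from any (pos, d) equals B's table-driven fold with the table started at pos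
theorem pvFold_eq (tokens : List String) : ∀ (pos : Int) (d : PySem.Dict String Int),
    (tokens.foldl
      (fun (st : Int × PySem.Dict String Int) t =>
        if PySem.Str.pyGet? t (-1) = some ':' then
          (st.1, st.2.insert (PySem.Str.slice t none (some (-1))) st.1)
        else (st.1 + 1, st.2))
      (pos, d)).2
    = (tokens.zip (pvPrefix tokens pos)).foldl
      (fun (d : PySem.Dict String Int) tp =>
        if PySem.Str.pyGet? tp.1 (-1) = some ':' then
          d.insert (PySem.Str.slice tp.1 none (some (-1))) tp.2
        else d) d := by
  induction tokens with
  | nil => intro pos d; rfl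
  | cons t ts ih =>
      intro pos d
      by_cases h : PySem.Str.pyGet? t (-1) = some ':'
      · simp only [List.foldl_cons, pvPrefix, List.zip_cons_cons, if_pos h, add_zero]
        exact ih pos (d.insert (PySem.Str.slice t none (some (-1))) pos)
      · simp only [List.foldl_cons, pvPrefix, List.zip_cons_cons, if_neg h]
        exact ih (pos + 1) d

-- ===== VERDICT (by name: the statement is the Claim_ definition above) =====
theorem detect_labels_spec : Claim_equal_detect_labels := by
  intro tokens _ _
  unfold Spec_detect_labels detect_labels detect_labels_alt
  rw [pvFold_eq]
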